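-- pv_equiv track=rewrite | github.com/Dies-Irae-mu/game | world/wod20th/utils/mortalplus_utils.py | calculate_ghoul_discipline_cost
-- ===== SOURCE A (Python) =====
-- def calculate_ghoul_discipline_cost(current_rating: int, new_rating: int, is_clan_discipline: bool) -> int:
--     """
--     Calculate XP cost for Ghoul disciplines.
--     In-clan: 20 XP then Current Rating * 15 XP
--     Out-of-clan: 20 XP then Current Rating * 25 XP
--     """
--     total_cost = 0
--     if current_rating == 0:
--         total_cost = 20  # Initial cost
--         current_rating = 1
--
--     for rating in range(current_rating + 1, new_rating + 1):
--         if is_clan_discipline: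
--             total_cost += (rating - 1) * 15
--         else:
--             total_cost += (rating - 1) * 25
--
--     return total_cost
-- ===== SOURCE B (Python) =====
-- def calculate_ghoul_discipline_cost(current_rating: int, new_rating: int, is_clan_discipline: bool) -> int:
--     """Closed-form: 20 XP initial cost at rating 0, then multiplier * sum of previous ratings."""
--     base = 20 if current_rating == 0 else 0
--     cur = 1 if current_rating == 0 else current_rating
--     if new_rating <= cur:
--         return base
--     mult = 15 if is_clan_discipline else 25
--     tri = lambda k: k * (k + 1) // 2
--     return base + mult * (tri(new_rating - 1) - tri(cur - 1))
-- ===== Notes on version B (the rewrite author's own statement) =====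
-- stated objective: faster
-- what changed: Replaced the per-rating accumulation loop with a closed-form arithmetic-series (triangular-number) formula times the multiplier; intended as faster (O(1) vs O(new_rating)) - a timing run measured a ~64x median ratio at the largest size, though inputs whose loop is empty show no gain.
import Mathlib
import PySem

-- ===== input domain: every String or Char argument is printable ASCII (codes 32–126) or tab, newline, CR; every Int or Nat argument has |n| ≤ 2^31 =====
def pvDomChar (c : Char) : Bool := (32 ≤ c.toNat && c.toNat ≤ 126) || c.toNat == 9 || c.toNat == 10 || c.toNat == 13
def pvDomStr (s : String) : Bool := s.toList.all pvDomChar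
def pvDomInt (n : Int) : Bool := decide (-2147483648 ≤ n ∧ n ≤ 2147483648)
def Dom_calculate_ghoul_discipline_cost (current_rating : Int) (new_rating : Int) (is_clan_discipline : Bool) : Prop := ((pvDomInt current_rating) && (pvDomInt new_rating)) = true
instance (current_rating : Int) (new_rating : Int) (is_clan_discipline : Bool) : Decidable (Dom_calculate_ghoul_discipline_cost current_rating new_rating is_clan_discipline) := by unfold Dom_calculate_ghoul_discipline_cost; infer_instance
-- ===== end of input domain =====

-- B replaces A's per-rating loop by a closed-form triangular-number formula; intended as faster (measured ~64x median at the largest timing size; no gain on empty-loop inputs).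


-- ===== PORT A =====
def calculate_ghoul_discipline_cost (current_rating : Int) (new_rating : Int) (is_clan_discipline : Bool) : Int :=
  let total_cost : Int := if current_rating = 0 then 20 else 0
  let cr : Int := if current_rating = 0 then 1 else current_rating
  (PySem.List.pyRange (cr + 1) (new_rating + 1) 1).foldl
    (fun acc rating => if is_clan_discipline then acc + (rating - 1) * 15 else acc + (rating - 1) * 25)
    total_cost

-- ===== PORT B =====
-- tri k = k*(k+1)//2 : the k-th triangular number (Python floor division, exact here)
def pvTri (k : Int) : Int := PySem.Int.floordiv (k * (k + 1)) 2

def calculate_ghoul_discipline_cost_alt (current_rating : Int) (new_rating : Int) (is_clan_discipline : Bool) : Int :=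
  let base : Int := if current_rating = 0 then 20 else 0
  let cur : Int := if current_rating = 0 then 1 else current_rating
  if new_rating ≤ cur then base
  else
    let mult : Int := if is_clan_discipline then 15 else 25
    base + mult * (pvTri (new_rating - 1) - pvTri (cur - 1))

-- ===== PRECONDITION & SPEC =====
def Spec_calculate_ghoul_discipline_cost (current_rating : Int) (new_rating : Int) (is_clan_discipline : Bool) (out : Int) : Prop := out = calculate_ghoul_discipline_cost_alt current_rating new_rating is_clan_discipline
instance (current_rating : Int) (new_rating : Int) (is_clan_discipline : Bool) (out : Int) : Decidable (Spec_calculate_ghoul_discipline_cost current_rating new_rating is_clan_discipline out) := by unfold Spec_calculate_ghoul_discipline_cost; infer_instance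

-- ===== CLAIM (what is proved, stated in full; the proofs are below) =====
def Claim_equal_calculate_ghoul_discipline_cost : Prop := ∀ (current_rating : Int) (new_rating : Int) (is_clan_discipline : Bool), Dom_calculate_ghoul_discipline_cost current_rating new_rating is_clan_discipline → Spec_calculate_ghoul_discipline_cost current_rating new_rating is_clan_discipline (calculate_ghoul_discipline_cost current_rating new_rating is_clan_discipline)

-- ===== LEMMAS AND PROOFS =====

theorem pvTri_succ (n : Int) : pvTri n = pvTri (n - 1) + n := by
  unfold pvTri
  rw [PySem.Int.floordiv_eq_ediv_of_pos (by norm_num), PySem.Int.floordiv_eq_ediv_of_pos (by norm_num)]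
  obtain ⟨a, ha⟩ := Int.even_mul_succ_self n
  obtain ⟨b, hb⟩ := Int.even_mul_succ_self (n - 1)
  have key : n * (n + 1) = (n - 1) * (n - 1 + 1) + 2 * n := by ring
  rw [ha, hb] at key
  have hab : a = b + n := by omega
  rw [ha, hb, hab]
  omega

theorem pvLoop (m : Int) (len : Nat) : ∀ (c t : Int),
    List.foldl (fun acc r => acc + (r - 1) * m) t (PySem.List.pyRange c (c + (len : Int)) 1)
      = t + m * (pvTri (c + (len : Int) - 2) - pvTri (c - 2)) := by
  induction len with
  | zero =>
    intro c t
    rw [show c + ((0 : Nat) : Int) = c by push_cast; ring,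
        PySem.List.pyRange_one_eq_nil (le_refl c)]
    simp
  | succ n ih =>
    intro c t
    have h2 : c + ((n + 1 : Nat) : Int) = (c + (n : Int)) + 1 := by push_cast; ring
    rw [h2, PySem.List.pyRange_one_succ_right (by omega), List.foldl_append]
    simp only [List.foldl]
    rw [ih]
    have e1 : c + (n : Int) + 1 - 2 = c + (n : Int) - 1 := by ring
    rw [e1]
    have hts := pvTri_succ (c + (n : Int) - 1)
    have e2 : c + (n : Int) - 1 - 1 = c + (n : Int) - 2 := by ring
    rw [e2] at hts
    linear_combination -m * hts

theorem calculate_ghoul_discipline_cost_spec : Claim_equal_calculate_ghoul_discipline_cost := by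
  intro cr nr clan _
  unfold Spec_calculate_ghoul_discipline_cost calculate_ghoul_discipline_cost calculate_ghoul_discipline_cost_alt
  simp only []
  set base : Int := if cr = 0 then 20 else 0 with hbase
  set cur : Int := if cr = 0 then 1 else cr with hcur
  by_cases hn : nr ≤ cur
  · rw [PySem.List.pyRange_one_eq_nil (by omega)]
    simp [hn]
  · have hlen : nr + 1 = (cur + 1) + (((nr - cur).toNat : Nat) : Int) := by omega
    rw [if_neg hn, hlen]
    cases clan with
    | true =>
      simp only [if_true]
      rw [pvLoop 15 (nr - cur).toNat (cur + 1) base]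
      have : (cur + 1) + (((nr - cur).toNat : Nat) : Int) - 2 = nr - 1 := by omega
      rw [this]
      ring_nf
    | false =>
      simp only [if_false, Bool.false_eq_true]
      rw [pvLoop 25 (nr - cur).toNat (cur + 1) base]
      have : (cur + 1) + (((nr - cur).toNat : Nat) : Int) - 2 = nr - 1 := by omega
      rw [this]
      ring_nf
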